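-- pv_equiv track=rewrite | github.com/FudanSEGraduationPrj/PJ_YuChaoJun | Step1_preprocessing.py | get_alias
-- ===== SOURCE A (Python) =====
-- def get_alias(qualified_name):
--     alias = set()
--     alias.add(qualified_name)
--     # 1.简写，取完全限定名最后一个单词
--     name=qualified_name.split(".")[-1]
--     alias.add(name)
--
--     #2.如果是方法，不含参数和括号
--     if name[-1]==")":
--         alias.add(name.split("(")[0])
--
--     #3.驼峰命名是标准，改成全小写或者_连接
--     tmp = []
--     for index, char in enumerate(name):
--         if char.isupper() and index != 0:
--             tmp.append("_")
--         tmp.append(char)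
--     alias.add("".join(tmp).lower())
--     alias.add(name.lower())
--
--     return alias
-- ===== SOURCE B (Python) =====
-- import re
--
-- def get_alias(qualified_name):
--     name = qualified_name.rpartition(".")[2]
--     alias = {qualified_name, name}
--     if name.endswith(")"):
--         alias.add(name.split("(")[0])
--     snake = re.sub(r'(?<=[\s\S])([A-Z])', r'_\1', name)
--     alias.add(snake.lower())
--     alias.add(name.lower())
--     return alias
-- ===== Notes on version B (the rewrite author's own statement) =====
-- stated objective: idiomatic
-- what changed: The index-based character loop that inserts underscores before uppercase letters is replaced by a single regex substitution producing the snake_case variant, and split('.')[-1] by rpartition; the set is built in one literal.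
-- outside the precondition, e.g. on get_alias(''): A raises IndexError, B returns {''}; on get_alias('.'): A raises IndexError, B returns {'', '.'}
import Mathlib
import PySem

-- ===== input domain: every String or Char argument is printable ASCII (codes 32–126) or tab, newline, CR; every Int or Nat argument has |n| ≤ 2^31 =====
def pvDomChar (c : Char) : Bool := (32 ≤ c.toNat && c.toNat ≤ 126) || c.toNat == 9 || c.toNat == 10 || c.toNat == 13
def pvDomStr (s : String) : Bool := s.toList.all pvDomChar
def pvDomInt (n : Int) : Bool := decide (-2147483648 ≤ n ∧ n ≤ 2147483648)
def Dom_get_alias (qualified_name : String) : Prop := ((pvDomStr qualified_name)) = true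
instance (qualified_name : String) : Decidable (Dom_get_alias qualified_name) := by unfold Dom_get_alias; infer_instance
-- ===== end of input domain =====

-- B (objective: idiomatic) replaces A's index-based camelCase loop by a regex-style substitution
-- (underscore before every uppercase letter that has a predecessor) and takes the last dotted
-- segment via rpartition instead of split(".")[-1].

-- ===== PORT A =====
-- the loop body of A's `for index, char in enumerate(name)` (tmp is Python's list of 1-char strings)
def aStep (tmp : List (List Char)) (p : Int × Char) : List (List Char) :=
  let tmp := if PySem.Chars.isupper p.2 && decide (p.1 ≠ 0) then tmp ++ [['_']] else tmp
  tmp ++ [[p.2]]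

def get_alias (qualified_name : String) : List String :=
  let al : PySem.Set String := PySem.Set.empty
  let al := PySem.Set.add al qualified_name
  -- name = qualified_name.split(".")[-1]  (the split list is never empty, so pyGet? is always some)
  let name := ((PySem.List.pyGet? ((PySem.Str.split? qualified_name ".").getD []) (-1))).getD ""
  let al := PySem.Set.add al name
  -- if name[-1] == ")"  (name[-1] raises IndexError on empty name: those inputs are outside Pre_)
  let al :=
    if (PySem.Str.pyGet? name (-1)).getD ' ' = ')' then
      PySem.Set.add al ((PySem.List.pyGet? ((PySem.Str.split? name "(").getD []) 0).getD "")
    else al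
  let tmp := (PySem.List.enumerate name.toList 0).foldl aStep []
  let al := PySem.Set.add al (String.ofList (PySem.Chars.lower (PySem.Chars.join [] tmp)))
  let al := PySem.Set.add al (PySem.Str.lower name)
  al

-- ===== PORT B =====
-- hand port (exact) of re.sub(r'(?<=[\s\S])([A-Z])', r'_\1', ·): every [A-Z] with a predecessor gets
-- '_' in front, i.e. the head char is kept and the substitution runs over the tail
def snakeTail (cs : List Char) : List Char :=
  cs.flatMap (fun c => if decide ('A' ≤ c) && decide (c ≤ 'Z') then ['_', c] else [c])

def get_alias_alt (qualified_name : String) : List String :=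
  -- name = qualified_name.rpartition(".")[2]: the part after the last '.', hand port (exact)
  let name := String.ofList ((qualified_name.toList.reverse.takeWhile (fun c => c ≠ '.')).reverse)
  let al : PySem.Set String := PySem.Set.ofList [qualified_name, name]
  let al :=
    if PySem.Chars.endswith name.toList [')'] then
      PySem.Set.add al ((PySem.List.pyGet? ((PySem.Str.split? name "(").getD []) 0).getD "")
    else al
  let snake : List Char :=
    match name.toList with
    | [] => []
    | c :: cs => c :: snakeTail cs
  let al := PySem.Set.add al (String.ofList (PySem.Chars.lower snake))
  PySem.Set.add al (PySem.Str.lower name)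

-- ===== PRECONDITION & SPEC =====
-- Pre_ excludes exactly the inputs whose last dotted segment is empty (qualified_name is "" or ends
-- with '.'): there Python A raises IndexError at name[-1].
def Pre_get_alias (qualified_name : String) : Prop :=
  qualified_name.toList ≠ [] ∧ qualified_name.toList.getLast? ≠ some '.'
instance (qualified_name : String) : Decidable (Pre_get_alias qualified_name) := by
  unfold Pre_get_alias; infer_instance
def pvWitness_get_alias : String := "a.b.CamelCase(x)"

def Spec_get_alias (qualified_name : String) (out : List String) : Prop := out = get_alias_alt qualified_name
instance (qualified_name : String) (out : List String) : Decidable (Spec_get_alias qualified_name out) := by unfold Spec_get_alias; infer_instance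

-- ===== CLAIM (what is proved, stated in full; the proofs are below) =====
def Claim_equal_get_alias : Prop := ∀ (qualified_name : String), Dom_get_alias qualified_name → Pre_get_alias qualified_name → Spec_get_alias qualified_name (get_alias qualified_name)

-- ===== LEMMAS AND PROOFS =====

lemma takeWhile_append_stop {α : Type} (p : α → Bool) (xs zs : List α) (h : ∃ x ∈ xs, p x = false) :
    (xs ++ zs).takeWhile p = xs.takeWhile p := by
  induction xs with
  | nil => simp at h
  | cons x t ih =>
    cases hx : p x with
    | false => simp [hx]
    | true =>
      rcases h with ⟨a, ha, hpa⟩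
      have hat : a ∈ t := by
        rcases List.mem_cons.mp ha with rfl | h'
        · rw [hx] at hpa; cases hpa
        · exact h'
      simp [hx, ih ⟨a, hat, hpa⟩]

lemma takeWhile_append_all {α : Type} (p : α → Bool) (xs zs : List α) (h : ∀ x ∈ xs, p x = true) :
    (xs ++ zs).takeWhile p = xs ++ zs.takeWhile p := by
  induction xs with
  | nil => simp
  | cons x t ih =>
    simp [h x (by simp), ih (fun a ha => h a (by simp [ha]))]

-- the last piece produced by split on "." is what remains of the reversed input before its first '.'
lemma splitOn_go_getLast? :
    ∀ (fuel : Nat) (l cur : List Char) (acc : List (List Char)), l.length ≤ fuel →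
      (PySem.Chars.splitOn.go ['.'] fuel l cur acc).getLast? =
        some (if '.' ∈ l then (l.reverse.takeWhile (fun c => !decide (c = '.'))).reverse
              else cur.reverse ++ l) := by
  intro fuel
  induction fuel with
  | zero =>
    intro l cur acc hl
    have : l = [] := List.eq_nil_of_length_eq_zero (Nat.le_zero.1 hl)
    subst this
    simp [PySem.Chars.splitOn.go]
  | succ f ih =>
    intro l cur acc hl
    cases l with
    | nil => simp [PySem.Chars.splitOn.go]
    | cons c rest =>
      have hrest : rest.length ≤ f := by simpa using hl
      by_cases hc : c = '.'
      · subst hc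
        have hstep : PySem.Chars.splitOn.go ['.'] (f+1) ('.' :: rest) cur acc
            = PySem.Chars.splitOn.go ['.'] f rest [] (cur.reverse :: acc) := by
          simp [PySem.Chars.splitOn.go, List.isPrefixOf]
        rw [hstep, ih rest [] (cur.reverse :: acc) hrest]
        by_cases hr : '.' ∈ rest
        · have hta := takeWhile_append_stop (fun c => !decide (c = '.')) rest.reverse ['.']
            ⟨'.', by simpa using hr, by simp⟩
          simp [hr, hta]
        · have hta := takeWhile_append_all (fun c => !decide (c = '.')) rest.reverse ['.']
            (fun a ha => by simp; rintro rfl; exact hr (by simpa using ha))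
          simp [hr, hta]
      · have hstep : PySem.Chars.splitOn.go ['.'] (f+1) (c :: rest) cur acc
            = PySem.Chars.splitOn.go ['.'] f rest (c :: cur) acc := by
          simp [PySem.Chars.splitOn.go, List.isPrefixOf, Ne.symm hc]
        rw [hstep, ih rest (c :: cur) acc hrest]
        by_cases hr : '.' ∈ rest
        · have hta := takeWhile_append_stop (fun c => !decide (c = '.')) rest.reverse [c]
            ⟨'.', by simpa using hr, by simp⟩
          simp [hr, Ne.symm hc, hta]
        · simp [hr, Ne.symm hc]

lemma lastSeg (cs : List Char) :
    (PySem.Chars.splitOn cs ['.']).getLast? =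
      some ((cs.reverse.takeWhile (fun c => c ≠ '.')).reverse) := by
  rw [show PySem.Chars.splitOn cs ['.'] = PySem.Chars.splitOn.go ['.'] (cs.length + 1) cs [] [] from rfl,
      splitOn_go_getLast? (cs.length + 1) cs [] [] (Nat.le_succ _)]
  by_cases hr : '.' ∈ cs
  · simp [hr]
  · have hta : cs.reverse.takeWhile (fun c => !decide (c = '.')) = cs.reverse := by
      rw [List.takeWhile_eq_self_iff]
      intro a ha
      simp
      rintro rfl
      exact hr (by simpa using ha)
    simp [hr, hta]

-- A's enumerate loop, from any index ≥ 1 on, is B's tail substitution (seen through flatten)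
lemma loopA_join (cs : List Char) : ∀ (k : Int) (acc : List (List Char)), 1 ≤ k →
    ((PySem.List.enumerate cs k).foldl aStep acc).flatten = acc.flatten ++ snakeTail cs := by
  induction cs with
  | nil => intro k acc hk; simp [PySem.List.enumerate, snakeTail]
  | cons c t ih =>
    intro k acc hk
    rw [PySem.List.enumerate_cons, List.foldl_cons, ih (k+1) _ (by omega)]
    have hk0 : decide (k ≠ 0) = true := by simp; omega
    unfold aStep snakeTail
    by_cases hu : PySem.Chars.isupper c = true
    · simp only [hu, hk0, Bool.and_self, if_true]
      simp only [PySem.Chars.isupper, Bool.and_eq_true, decide_eq_true_eq] at hu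
      simp [List.flatMap_cons, hu.1, hu.2]
    · simp only [hu, Bool.false_and]
      have hp : ¬ ('A' ≤ c ∧ c ≤ 'Z') := by
        simpa [PySem.Chars.isupper] using hu
      simp [List.flatMap_cons, hp]

lemma singleton_suffix_iff {α : Type} [DecidableEq α] (cs : List α) (x : α) :
    [x] <:+ cs ↔ cs.getLast? = some x := by
  constructor
  · rintro ⟨t, rfl⟩; simp
  · intro h
    rcases List.getLast?_eq_some_iff.1 h with ⟨t, rfl⟩
    exact ⟨t, rfl⟩

lemma pyGet?_neg_one {α : Type} (xs : List α) : PySem.List.pyGet? xs (-1) = xs.getLast? := by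
  simp only [PySem.List.pyGet?, PySem.List.pyIdx?]
  rcases eq_or_ne xs [] with h | h
  · subst h; simp
  · have h1 : 1 ≤ xs.length := by cases xs <;> simp_all
    simp [h1, List.getLast?_eq_getElem?]

-- A's `name[-1] == ")"` test (with the unreachable default) is B's endswith test
lemma cond_iff (cs : List Char) :
    ((PySem.List.pyGet? cs (-1)).getD ' ' = ')') ↔ (PySem.Chars.endswith cs [')'] = true) := by
  rw [pyGet?_neg_one]
  simp only [PySem.Chars.endswith, List.isSuffixOf_iff_suffix, singleton_suffix_iff]
  cases h : cs.getLast? <;> simp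

lemma join_nil_eq_flatten (l : List (List Char)) : PySem.Chars.join [] l = l.flatten := by
  induction l with
  | nil => rfl
  | cons a t ih =>
    cases t with
    | nil => simp [PySem.Chars.join, List.intercalate]
    | cons b t' =>
      simp only [PySem.Chars.join, List.intercalate] at ih ⊢
      simp [List.intersperse] at ih ⊢
      simpa using ih

lemma ports_agree (q : String) : get_alias q = get_alias_alt q := by
  have hname : ((PySem.List.pyGet? ((PySem.Str.split? q ".").getD []) (-1))).getD ""
      = String.ofList ((q.toList.reverse.takeWhile (fun c => c ≠ '.')).reverse) := by
    simp [PySem.Str.split?, PySem.Chars.split?, pyGet?_neg_one, List.getLast?_map, lastSeg]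
  have hflat : ∀ cs : List Char,
      PySem.Chars.join [] ((PySem.List.enumerate cs 0).foldl aStep [])
        = (match cs with | [] => [] | c :: t => c :: snakeTail t) := by
    intro cs
    cases cs with
    | nil => rfl
    | cons c t =>
      rw [join_nil_eq_flatten, PySem.List.enumerate_cons, List.foldl_cons]
      have : aStep [] ((0 : Int), c) = [[c]] := by simp [aStep]
      rw [this, show (0:Int)+1 = 1 from rfl, loopA_join t 1 [[c]] (by norm_num)]
      simp
  simp only [get_alias, get_alias_alt, hname]
  rw [hflat]
  simp only [PySem.Str.pyGet?_eq, PySem.Chars.pyGet?_eq_listPyGet?, cond_iff]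
  simp [PySem.Set.ofList]

-- ===== VERDICT (by name: the statement is the Claim_ definition above) =====
theorem get_alias_spec : Claim_equal_get_alias := by
  intro q _ _
  unfold Spec_get_alias
  exact ports_agree q
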